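-- pv_equiv track=rewrite | github.com/rancher/rancher | env/lib/python3.8/site-packages/botocore/compat.py | _windows_shell_split
-- ===== SOURCE A (Python) =====
-- from math import floor
--
-- def _windows_shell_split(s):
--     """Splits up a windows command as the built-in command parser would.
--
--     Windows has potentially bizarre rules depending on where you look. When
--     spawning a process via the Windows C runtime (which is what python does
--     when you call popen) the rules are as follows:
--
--     https://docs.microsoft.com/en-us/cpp/cpp/parsing-cpp-command-line-arguments
--
--     To summarize:
--
--     * Only space and tab are valid delimiters
--     * Double quotes are the only valid quotes
--     * Backslash is interpreted literally unless it is part of a chain that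
--       leads up to a double quote. Then the backslashes escape the backslashes,
--       and if there is an odd number the final backslash escapes the quote.
--
--     :param s: The command string to split up into parts.
--     :return: A list of command components.
--     """
--     if not s:
--         return []
--
--     components = []
--     buff = []
--     is_quoted = False
--     num_backslashes = 0
--     for character in s:
--         if character == '\\':
--             # We can't simply append backslashes because we don't know if
--             # they are being used as escape characters or not. Instead we
--             # keep track of how many we've encountered and handle them when
--             # we encounter a different character.
--             num_backslashes += 1
--         elif character == '"':
--             if num_backslashes > 0:
--                 # The backslashes are in a chain leading up to a double
--                 # quote, so they are escaping each other.
--                 buff.append('\\' * int(floor(num_backslashes / 2)))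
--                 remainder = num_backslashes % 2
--                 num_backslashes = 0
--                 if remainder == 1:
--                     # The number of backslashes is uneven, so they are also
--                     # escaping the double quote, so it needs to be added to
--                     # the current component buffer.
--                     buff.append('"')
--                     continue
--
--             # We've encountered a double quote that is not escaped,
--             # so we toggle is_quoted.
--             is_quoted = not is_quoted
--
--             # If there are quotes, then we may want an empty string. To be
--             # safe, we add an empty string to the buffer so that we make
--             # sure it sticks around if there's nothing else between quotes.
--             # If there is other stuff between quotes, the empty string will
--             # disappear during the joining process.
--             buff.append('')
--         elif character in [' ', '\t'] and not is_quoted: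
--             # Since the backslashes aren't leading up to a quote, we put in
--             # the exact number of backslashes.
--             if num_backslashes > 0:
--                 buff.append('\\' * num_backslashes)
--                 num_backslashes = 0
--
--             # Excess whitespace is ignored, so only add the components list
--             # if there is anything in the buffer.
--             if buff:
--                 components.append(''.join(buff))
--                 buff = []
--         else:
--             # Since the backslashes aren't leading up to a quote, we put in
--             # the exact number of backslashes.
--             if num_backslashes > 0:
--                 buff.append('\\' * num_backslashes)
--                 num_backslashes = 0
--             buff.append(character)
--
--     # Quotes must be terminated.
--     if is_quoted:
--         raise ValueError('No closing quotation in string: %s' % s)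
--
--     # There may be some leftover backslashes, so we need to add them in.
--     # There's no quote so we add the exact number.
--     if num_backslashes > 0:
--         buff.append('\\' * num_backslashes)
--
--     # Add the final component in if there is anything in the buffer.
--     if buff:
--         components.append(''.join(buff))
--
--     return components
-- ===== SOURCE B (Python) =====
-- def _windows_shell_split(s):
--     """Splits up a windows command as the built-in command parser would.
--
--     Index-based re-implementation: consumes each run of consecutive
--     backslashes in one inner scan and then decides what it escapes, instead
--     of carrying a per-character backslash counter through a for loop.
--     """
--     components = []
--     buff = []
--     is_quoted = False
--     i = 0
--     n = len(s)
--     while i < n: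
--         c = s[i]
--         if c == '\\':
--             j = i
--             while j < n and s[j] == '\\':
--                 j += 1
--             run = j - i
--             if j < n and s[j] == '"':
--                 # The run leads up to a double quote: pairs escape each
--                 # other, an odd trailing backslash escapes the quote.
--                 buff.append('\\' * (run // 2))
--                 if run % 2 == 1:
--                     buff.append('"')
--                 else:
--                     is_quoted = not is_quoted
--                     buff.append('')
--                 i = j + 1
--             else:
--                 buff.append('\\' * run)
--                 i = j
--         elif c == '"':
--             is_quoted = not is_quoted
--             buff.append('')
--             i += 1
--         elif c in ' \t' and not is_quoted:
--             if buff: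
--                 components.append(''.join(buff))
--                 buff = []
--             i += 1
--         else:
--             buff.append(c)
--             i += 1
--     if is_quoted:
--         raise ValueError('No closing quotation in string: %s' % s)
--     if buff:
--         components.append(''.join(buff))
--     return components
-- ===== Notes on version B (the rewrite author's own statement) =====
-- stated objective: alternative
-- what changed: Replaces A's per-character for loop that carries a num_backslashes accumulator across iterations by an index-based while loop that consumes each run of consecutive backslashes in one inner scan and then decides from the character after the run what the run escapes.
import Mathlib
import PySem

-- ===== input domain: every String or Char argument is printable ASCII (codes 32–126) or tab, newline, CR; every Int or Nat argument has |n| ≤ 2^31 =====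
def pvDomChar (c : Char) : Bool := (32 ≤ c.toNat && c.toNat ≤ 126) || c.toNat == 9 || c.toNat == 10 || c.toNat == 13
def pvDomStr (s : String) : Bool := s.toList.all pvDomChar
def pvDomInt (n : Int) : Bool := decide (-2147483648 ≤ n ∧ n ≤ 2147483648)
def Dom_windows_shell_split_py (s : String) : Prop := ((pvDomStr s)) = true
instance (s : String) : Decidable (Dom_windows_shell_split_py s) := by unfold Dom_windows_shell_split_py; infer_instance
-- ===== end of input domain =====

-- B replaces A's per-character fold with a carried backslash counter by an
-- index-style loop that consumes each backslash run in one inner scan (alternative decomposition).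


-- ===== PORT A =====
-- '\\' * n
def pvBs (n : Nat) : String := String.mk (List.replicate n '\\')

-- one iteration of A's for loop; state = (components, buff, is_quoted, num_backslashes)
def pvAStep (st : List String × List String × Bool × Nat) (c : Char) :
    List String × List String × Bool × Nat :=
  let comps := st.1; let buff := st.2.1; let q := st.2.2.1; let nb := st.2.2.2
  if c = '\\' then (comps, buff, q, nb + 1)
  else if c = '"' then
    if nb > 0 then
      if nb % 2 = 1 then (comps, buff ++ [pvBs (nb / 2), "\""], q, 0)
      else (comps, buff ++ [pvBs (nb / 2), ""], !q, 0)
    else (comps, buff ++ [""], !q, 0)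
  else if (c = ' ' ∨ c = '\t') ∧ q = false then
    let buff2 := if nb > 0 then buff ++ [pvBs nb] else buff
    if buff2 ≠ [] then (comps ++ [String.join buff2], [], q, 0) else (comps, [], q, 0)
  else
    let buff2 := if nb > 0 then buff ++ [pvBs nb] else buff
    (comps, buff2 ++ [String.mk [c]], q, 0)

-- A's code after the loop (trailing backslashes, final flush); the
-- 'if is_quoted: raise ValueError' is excluded by Pre_ and ignored here
def pvAFinish (st : List String × List String × Bool × Nat) : List String :=
  let buff := if st.2.2.2 > 0 then st.2.1 ++ [pvBs st.2.2.2] else st.2.1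
  if buff ≠ [] then st.1 ++ [String.join buff] else st.1

def windows_shell_split_py (s : String) : List String :=
  if s = "" then []
  else pvAFinish (s.toList.foldl pvAStep ([], [], false, 0))

-- ===== PORT B =====
-- the inner 'while s[j] == "\\"' scan: (length of leading backslash run, remainder)
def pvBsRun : List Char → Nat × List Char
  | [] => (0, [])
  | c :: r => if c = '\\' then ((pvBsRun r).1 + 1, (pvBsRun r).2) else (0, c :: r)

theorem pvBsRun_len_le (cs : List Char) : (pvBsRun cs).2.length ≤ cs.length := by
  induction cs with
  | nil => simp [pvBsRun]
  | cons c r ih =>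
    by_cases h : c = '\\' <;> simp [pvBsRun, h]
    omega

-- B's outer while loop; the 'if is_quoted: raise ValueError' at the end is
-- excluded by Pre_ and ignored here
def pvBGo (cs : List Char) (q : Bool) (buff comps : List String) : List String :=
  match cs with
  | [] => if buff ≠ [] then comps ++ [String.join buff] else comps
  | c :: rest =>
    if c = '\\' then
      let n := (pvBsRun rest).1 + 1
      let after := (pvBsRun rest).2
      if after.head? = some '"' then
        if n % 2 = 1 then pvBGo after.tail q (buff ++ [pvBs (n / 2), "\""]) comps
        else pvBGo after.tail (!q) (buff ++ [pvBs (n / 2), ""]) comps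
      else pvBGo after q (buff ++ [pvBs n]) comps
    else if c = '"' then pvBGo rest (!q) (buff ++ [""]) comps
    else if (c = ' ' ∨ c = '\t') ∧ q = false then
      pvBGo rest q [] (if buff ≠ [] then comps ++ [String.join buff] else comps)
    else pvBGo rest q (buff ++ [String.mk [c]]) comps
termination_by cs.length
decreasing_by
  · have h1 := pvBsRun_len_le rest
    simp; omega
  · have h1 := pvBsRun_len_le rest
    simp; omega
  · have h1 := pvBsRun_len_le rest
    simp; omega
  · simp
  · simp
  · simp

def windows_shell_split_py_alt (s : String) : List String :=
  pvBGo s.toList false [] []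

-- ===== PRECONDITION & SPEC =====
-- counts the quotes that toggle is_quoted (those preceded by an even run of backslashes)
def pvTogglingQuotes : List Char → Nat → Nat
  | [], _ => 0
  | c :: r, nb =>
    if c = '\\' then pvTogglingQuotes r (nb + 1)
    else if c = '"' then (if nb % 2 = 0 then 1 else 0) + pvTogglingQuotes r 0
    else pvTogglingQuotes r 0

-- Pre_ excludes exactly the strings with an unterminated double quote, on which
-- the Python (both A and B) raises ValueError.
def Pre_windows_shell_split_py (s : String) : Prop :=
  pvTogglingQuotes s.toList 0 % 2 = 0
instance (s : String) : Decidable (Pre_windows_shell_split_py s) := by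
  unfold Pre_windows_shell_split_py; infer_instance

def pvWitness_windows_shell_split_py : String := "a\\\\ \"b \\\" c\" d"

def Spec_windows_shell_split_py (s : String) (out : List String) : Prop := out = windows_shell_split_py_alt s
instance (s : String) (out : List String) : Decidable (Spec_windows_shell_split_py s out) := by unfold Spec_windows_shell_split_py; infer_instance

-- ===== CLAIM (what is proved, stated in full; the proofs are below) =====
def Claim_equal_windows_shell_split_py : Prop := ∀ (s : String), Dom_windows_shell_split_py s → Pre_windows_shell_split_py s → Spec_windows_shell_split_py s (windows_shell_split_py s)

-- ===== LEMMAS AND PROOFS =====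

theorem pvBsRun_replicate (k : Nat) (cs : List Char) :
    pvBsRun (List.replicate k '\\' ++ cs) = ((pvBsRun cs).1 + k, (pvBsRun cs).2) := by
  induction k with
  | zero => simp
  | succ k ih => simp [List.replicate_succ, pvBsRun, ih]; omega

theorem pvBsRun_not_bs (c : Char) (cs : List Char) (h : c ≠ '\\') :
    pvBsRun (c :: cs) = (0, c :: cs) := by simp [pvBsRun, h]

-- main invariant: A's fold with nb pending backslashes, followed by A's finish,
-- equals B's loop run on the string with those nb backslashes put back in front
theorem pv_main (cs : List Char) : ∀ (nb : Nat) (q : Bool) (buff comps : List String),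
    pvAFinish (cs.foldl pvAStep (comps, buff, q, nb))
      = pvBGo (List.replicate nb '\\' ++ cs) q buff comps := by
  induction cs with
  | nil =>
    intro nb q buff comps
    cases nb with
    | zero => simp [pvAFinish, pvBGo]
    | succ k =>
      have hrun : pvBsRun (List.replicate k '\\') = (k, []) := by
        have h := pvBsRun_replicate k []
        simpa [pvBsRun] using h
      simp only [List.foldl_nil, List.append_nil]
      rw [List.replicate_succ, pvBGo]
      simp [hrun, pvAFinish, pvBGo]
  | cons c cs ih =>
    intro nb q buff comps
    have ih0 : ∀ (q : Bool) (buff comps : List String),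
        pvAFinish (cs.foldl pvAStep (comps, buff, q, 0)) = pvBGo cs q buff comps := by
      intro a b c'
      have h := ih 0 a b c'
      simpa using h
    simp only [List.foldl_cons]
    by_cases hbs : c = '\\'
    · subst hbs
      have hrep : (List.replicate nb '\\' ++ '\\' :: cs) = List.replicate (nb+1) '\\' ++ cs := by
        simp [List.replicate_succ']
      rw [hrep, ← ih (nb+1)]
      simp [pvAStep]
    · by_cases hq : c = '"'
      · subst hq
        cases nb with
        | zero =>
          simp only [List.replicate, List.nil_append]
          rw [pvBGo]
          have hstep : pvAStep (comps, buff, q, 0) '"' = (comps, buff ++ [""], !q, 0) := by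
            simp [pvAStep]
          rw [hstep]
          simp [ih0]
        | succ k =>
          have hrun : pvBsRun (List.replicate k '\\' ++ '"' :: cs) = (k, '"' :: cs) := by
            rw [pvBsRun_replicate]; simp [pvBsRun]
          rw [List.replicate_succ]
          simp only [List.cons_append]
          rw [pvBGo]
          simp only [hrun, List.head?_cons, List.tail_cons]
          by_cases hodd : (k + 1) % 2 = 1
          · have hstep : pvAStep (comps, buff, q, k + 1) '"'
                = (comps, buff ++ [pvBs ((k+1) / 2), "\""], q, 0) := by
              simp [pvAStep, hodd]
            rw [hstep]
            simp [ih0, hodd]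
          · have hstep : pvAStep (comps, buff, q, k + 1) '"'
                = (comps, buff ++ [pvBs ((k+1) / 2), ""], !q, 0) := by
              simp [pvAStep, hodd]
            rw [hstep]
            simp [ih0, hodd]
      · by_cases hsp : (c = ' ' ∨ c = '\t') ∧ q = false
        · have hstep : pvAStep (comps, buff, q, 0) c
              = ((if buff ≠ [] then comps ++ [String.join buff] else comps), [], q, 0) := by
            by_cases hb : buff = [] <;> simp [pvAStep, hbs, hq, hsp, hb]
          cases nb with
          | zero =>
            simp only [List.replicate, List.nil_append]
            rw [pvBGo]
            rw [hstep]
            simp [ih0, hbs, hq, hsp]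
          | succ k =>
            have hrun : pvBsRun (List.replicate k '\\' ++ c :: cs) = (k, c :: cs) := by
              rw [pvBsRun_replicate, pvBsRun_not_bs c cs hbs]; simp
            have hstep2 : pvAStep (comps, buff, q, k + 1) c
                = (comps ++ [String.join (buff ++ [pvBs (k+1)])], [], q, 0) := by
              simp [pvAStep, hbs, hq, hsp]
            rw [List.replicate_succ]
            simp only [List.cons_append]
            rw [hstep2, ih0]
            simp [pvBGo, hrun, hbs, hq, hsp.1, hsp.2]
        · cases nb with
          | zero =>
            have hstep : pvAStep (comps, buff, q, 0) c
                = (comps, buff ++ [String.mk [c]], q, 0) := by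
              simp [pvAStep, hbs, hq, hsp]
            simp only [List.replicate, List.nil_append]
            rw [pvBGo]
            rw [hstep]
            simp [ih0, hbs, hq, hsp]
          | succ k =>
            have hrun : pvBsRun (List.replicate k '\\' ++ c :: cs) = (k, c :: cs) := by
              rw [pvBsRun_replicate, pvBsRun_not_bs c cs hbs]; simp
            have hstep2 : pvAStep (comps, buff, q, k + 1) c
                = (comps, buff ++ [pvBs (k+1)] ++ [String.mk [c]], q, 0) := by
              simp [pvAStep, hbs, hq, hsp]
            rw [List.replicate_succ]
            simp only [List.cons_append]
            rw [hstep2, ih0]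
            simp [pvBGo, hrun, hbs, hq, hsp]

-- ===== VERDICT (by name: the statement is the Claim_ definition above) =====
theorem windows_shell_split_py_spec : Claim_equal_windows_shell_split_py := by
  intro s _ _
  unfold Spec_windows_shell_split_py windows_shell_split_py windows_shell_split_py_alt
  by_cases hs : s = ""
  · subst hs; simp [pvBGo]
  · rw [if_neg hs]
    have := pv_main s.toList 0 false [] []
    simpa using this
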